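-- pv_equiv track=rewrite | github.com/kelvinhuang0327/number-pattern-research | tools/backtest_moderate_cold_pool.py | gap_profile
-- ===== SOURCE A (Python) =====
-- def gap_profile(history, max_num=49):
--     """計算每個號碼的 gap (距上次出現的期數)"""
--     gaps = {}
--     for n in range(1, max_num + 1):
--         gaps[n] = len(history)  # default: 從未出現
--
--     for i, d in enumerate(reversed(history)):
--         idx = len(history) - 1 - i
--         for n in d['numbers']:
--             if n <= max_num and n not in gaps or gaps[n] == len(history):
--                 gaps[n] = i  # gap = distance from end
--
--     # 重新計算：gap = 距離最後一次出現的期數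
--     gaps = {}
--     for n in range(1, max_num + 1):
--         gaps[n] = len(history)
--     for i in range(len(history) - 1, -1, -1):
--         for n in history[i]['numbers']:
--             if n <= max_num and gaps[n] == len(history):
--                 gaps[n] = len(history) - 1 - i
--
--     return gaps
-- ===== SOURCE B (Python) =====
-- def gap_profile(history, max_num=49):
--     """計算每個號碼的 gap (距上次出現的期數): single forward pass, newest draw overwrites."""
--     L = len(history)
--     gaps = {n: L for n in range(1, max_num + 1)}
--     for i, d in enumerate(history):
--         for n in d['numbers']:
--             if 1 <= n <= max_num:
--                 gaps[n] = L - 1 - i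
--     return gaps
-- ===== Notes on version B (the rewrite author's own statement) =====
-- stated objective: simpler
-- what changed: B drops A's dead first backward pass and replaces the remaining backward scan with its 'only if still unset' sentinel guard by a single forward pass in which the newest draw simply overwrites older ones.
import Mathlib
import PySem

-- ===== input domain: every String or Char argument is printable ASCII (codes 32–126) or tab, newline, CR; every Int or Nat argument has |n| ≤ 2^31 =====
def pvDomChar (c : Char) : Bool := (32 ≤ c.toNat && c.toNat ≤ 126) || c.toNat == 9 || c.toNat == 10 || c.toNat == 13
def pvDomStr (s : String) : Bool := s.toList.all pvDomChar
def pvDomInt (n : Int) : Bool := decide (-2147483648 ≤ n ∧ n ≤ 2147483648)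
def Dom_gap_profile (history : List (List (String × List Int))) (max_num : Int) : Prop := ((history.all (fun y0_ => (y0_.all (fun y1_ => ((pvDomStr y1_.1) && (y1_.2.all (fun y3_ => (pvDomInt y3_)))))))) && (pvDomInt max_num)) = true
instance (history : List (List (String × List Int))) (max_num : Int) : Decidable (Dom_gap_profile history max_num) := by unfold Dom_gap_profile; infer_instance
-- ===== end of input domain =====

-- B replaces A's two backward scans (one of them dead code) by a single forward pass whose
-- plain overwrite lets the newest draw win; objective: simpler (one pass, no sentinel guard).

-- d['numbers'] (exact under Pre_, which demands the key; Python raises KeyError when it is missing)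
def pvNums (d : List (String × List Int)) : List Int := (List.lookup "numbers" d).getD []

-- ===== PORT A =====
def gap_profile (history : List (List (String × List Int))) (max_num : Int) : List (Int × Int) :=
  let L : Int := PySem.List.len history
  -- gaps = {}; for n in range(1, max_num+1): gaps[n] = len(history)
  let gaps : PySem.Dict Int Int :=
    (PySem.List.pyRange 1 (max_num + 1) 1).foldl (fun g n => g.insert n L) PySem.Dict.empty
  -- first backward pass (its result is discarded below, exactly as in the Python);
  -- 'gaps[n]' in the or-branch is exact under Pre_ (Python raises KeyError on a missing key)
  let gaps : PySem.Dict Int Int :=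
    (PySem.List.enumerate history.reverse 0).foldl (fun g p =>
      let _idx := L - 1 - p.1
      (pvNums p.2).foldl (fun g n =>
        if (decide (n ≤ max_num) && !(g.contains n)) || (g.getD n 0 == L)
        then g.insert n p.1 else g) g) gaps
  -- gaps = {}; refill the defaults
  let gaps : PySem.Dict Int Int :=
    (PySem.List.pyRange 1 (max_num + 1) 1).foldl (fun g n => g.insert n L) PySem.Dict.empty
  -- for i in range(len(history)-1, -1, -1): for n in history[i]['numbers']: …
  let gaps : PySem.Dict Int Int :=
    (PySem.List.pyRange (L - 1) (-1) (-1)).foldl (fun g i =>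
      (pvNums (PySem.List.pyGetD history i [])).foldl (fun g n =>
        if decide (n ≤ max_num) && (g.getD n 0 == L)
        then g.insert n (L - 1 - i) else g) g) gaps
  gaps.items

-- ===== PORT B =====
def gap_profile_alt (history : List (List (String × List Int))) (max_num : Int) : List (Int × Int) :=
  let L : Int := PySem.List.len history
  -- gaps = {n: L for n in range(1, max_num + 1)}  (the range's keys are distinct)
  let gaps : PySem.Dict Int Int :=
    PySem.Dict.mk ((PySem.List.pyRange 1 (max_num + 1) 1).map (fun n => (n, L)))
  -- for i, d in enumerate(history): for n in d['numbers']: if 1 <= n <= max_num: gaps[n] = L-1-i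
  let gaps : PySem.Dict Int Int :=
    (PySem.List.enumerate history 0).foldl (fun g p =>
      (pvNums p.2).foldl (fun g n =>
        if decide (1 ≤ n) && decide (n ≤ max_num)
        then g.insert n (L - 1 - p.1) else g) g) gaps
  gaps.items

-- ===== PRECONDITION & SPEC =====
-- Pre_ excludes exactly the inputs on which A raises KeyError: a draw without a "numbers" key,
-- or a drawn number outside 1..max_num (A reads gaps[n] for such n on a dict keyed 1..max_num).
def Pre_gap_profile (history : List (List (String × List Int))) (max_num : Int) : Prop :=
  ∀ d ∈ history, (List.lookup "numbers" d).isSome = true ∧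
    ∀ n ∈ (List.lookup "numbers" d).getD [], 1 ≤ n ∧ n ≤ max_num
instance (history : List (List (String × List Int))) (max_num : Int) : Decidable (Pre_gap_profile history max_num) := by unfold Pre_gap_profile; infer_instance

def pvWitness_gap_profile : (List (List (String × List Int))) × Int :=
  ([[("numbers", [1, 2])], [("numbers", [2])]], 3)

def Spec_gap_profile (history : List (List (String × List Int))) (max_num : Int) (out : List (Int × Int)) : Prop := out = gap_profile_alt history max_num
instance (history : List (List (String × List Int))) (max_num : Int) (out : List (Int × Int)) : Decidable (Spec_gap_profile history max_num out) := by unfold Spec_gap_profile; infer_instance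

-- ===== CLAIM (what is proved, stated in full; the proofs are below) =====
def Claim_equal_gap_profile : Prop := ∀ (history : List (List (String × List Int))) (max_num : Int), Dom_gap_profile history max_num → Pre_gap_profile history max_num → Spec_gap_profile history max_num (gap_profile history max_num)

-- ===== LEMMAS AND PROOFS =====

-- index (counting from the END of hist) of the LAST draw containing n, i.e. the position in
-- hist.reverse of the first draw containing n
def pvLastGap : List (List (String × List Int)) → Int → Option Nat
  | [], _ => none
  | d :: rest, n =>
    match pvLastGap rest n with
    | some j => some j
    | none => if n ∈ pvNums d then some rest.length else none

-- index of the FIRST draw (scanning from the front) containing n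
def pvFirstHit : List (List (String × List Int)) → Int → Option Nat
  | [], _ => none
  | d :: rest, n => if n ∈ pvNums d then some 0 else (pvFirstHit rest n).map (· + 1)

theorem pvFirstHit_append (l₁ l₂ : List (List (String × List Int))) (n : Int) :
    pvFirstHit (l₁ ++ l₂) n =
      match pvFirstHit l₁ n with
      | some j => some j
      | none => (pvFirstHit l₂ n).map (· + l₁.length) := by
  induction l₁ with
  | nil => cases h : pvFirstHit l₂ n <;> simp [pvFirstHit, h]
  | cons d rest ih =>
    simp only [List.cons_append, pvFirstHit, ih]
    by_cases h : n ∈ pvNums d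
    · simp [h]
    · cases hf : pvFirstHit rest n with
      | some j => simp [h, hf]
      | none =>
        cases hl : pvFirstHit l₂ n with
        | some j => simp [h, hf, hl]; omega
        | none => simp [h, hf, hl]

theorem pvFirstHit_reverse (l : List (List (String × List Int))) (n : Int) :
    pvFirstHit l.reverse n = pvLastGap l n := by
  induction l with
  | nil => rfl
  | cons d rest ih =>
    simp only [List.reverse_cons, pvFirstHit_append, ih, pvLastGap]
    cases pvLastGap rest n with
    | some j => rfl
    | none =>
      by_cases h : n ∈ pvNums d <;> simp [pvFirstHit, h]

theorem pv_stepA_getD (max_num L v m n : Int) (g : PySem.Dict Int Int) :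
    ((if decide (m ≤ max_num) && (g.getD m 0 == L) then g.insert m v else g) :
        PySem.Dict Int Int).getD n 0 =
      if n = m ∧ m ≤ max_num ∧ g.getD m 0 = L then v else g.getD n 0 := by
  by_cases hnm : n = m
  · subst hnm
    by_cases h1 : n ≤ max_num <;> by_cases h2 : g.getD n 0 = L <;>
      simp [h1, h2, PySem.Dict.getD_insert_self]
  · have hne := PySem.Dict.getD_insert_of_ne g (k := m) (k' := n) v 0 hnm
    by_cases h1 : m ≤ max_num <;> by_cases h2 : g.getD m 0 = L <;>
      simp [h1, h2, hnm, hne]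

theorem pv_stepB_getD (max_num v m n : Int) (g : PySem.Dict Int Int) :
    ((if decide (1 ≤ m) && decide (m ≤ max_num) then g.insert m v else g) :
        PySem.Dict Int Int).getD n 0 =
      if n = m ∧ 1 ≤ m ∧ m ≤ max_num then v else g.getD n 0 := by
  by_cases hnm : n = m
  · subst hnm
    by_cases h1 : 1 ≤ n <;> by_cases h2 : n ≤ max_num <;>
      simp [h1, h2, PySem.Dict.getD_insert_self]
  · have hne := PySem.Dict.getD_insert_of_ne g (k := m) (k' := n) v 0 hnm
    by_cases h1 : 1 ≤ m <;> by_cases h2 : m ≤ max_num <;>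
      simp [h1, h2, hnm, hne]

theorem pv_innerA_getD (max_num L v : Int) (nums : List Int) (g : PySem.Dict Int Int) (n : Int)
    (hv : v ≠ L) :
    (nums.foldl (fun g n' =>
        if decide (n' ≤ max_num) && (g.getD n' 0 == L) then g.insert n' v else g) g).getD n 0 =
      if n ∈ nums ∧ n ≤ max_num ∧ g.getD n 0 = L then v else g.getD n 0 := by
  induction nums generalizing g with
  | nil => simp
  | cons m rest ih =>
    simp only [List.foldl_cons]
    rw [ih, pv_stepA_getD]
    by_cases hnm : n = m
    · subst hnm
      by_cases h1 : n ≤ max_num <;> by_cases h2 : g.getD n 0 = L <;>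
        simp [h1, h2, hv, List.mem_cons]
    · simp [List.mem_cons, hnm]

theorem pv_innerB_getD (max_num v : Int) (nums : List Int) (g : PySem.Dict Int Int) (n : Int) :
    (nums.foldl (fun g n' =>
        if decide (1 ≤ n') && decide (n' ≤ max_num) then g.insert n' v else g) g).getD n 0 =
      if n ∈ nums ∧ 1 ≤ n ∧ n ≤ max_num then v else g.getD n 0 := by
  induction nums generalizing g with
  | nil => simp
  | cons m rest ih =>
    simp only [List.foldl_cons]
    rw [ih, pv_stepB_getD]
    by_cases hnm : n = m
    · subst hnm
      by_cases h1 : 1 ≤ n <;> by_cases h2 : n ≤ max_num <;>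
        by_cases hr : n ∈ rest <;> simp [h1, h2, hr, List.mem_cons]
    · simp [List.mem_cons, hnm]

theorem pv_innerA_keys (max_num L v : Int) (nums : List Int) (g : PySem.Dict Int Int)
    (h : ∀ n ∈ nums, n ∈ g.keys) :
    (nums.foldl (fun g n' =>
        if decide (n' ≤ max_num) && (g.getD n' 0 == L) then g.insert n' v else g) g).keys = g.keys := by
  induction nums generalizing g with
  | nil => simp
  | cons m rest ih =>
    simp only [List.foldl_cons]
    have hk : ((if decide (m ≤ max_num) && (g.getD m 0 == L) then g.insert m v else g) :
        PySem.Dict Int Int).keys = g.keys := by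
      split
      · exact PySem.Dict.keys_insert_of_contains g v
          ((PySem.Dict.contains_iff_mem_keys g m).2 (h m List.mem_cons_self))
      · rfl
    rw [ih _ (fun n hn => hk ▸ h n (List.mem_cons_of_mem m hn)), hk]

theorem pv_innerB_keys (max_num v : Int) (nums : List Int) (g : PySem.Dict Int Int)
    (h : ∀ n ∈ nums, n ∈ g.keys) :
    (nums.foldl (fun g n' =>
        if decide (1 ≤ n') && decide (n' ≤ max_num) then g.insert n' v else g) g).keys = g.keys := by
  induction nums generalizing g with
  | nil => simp
  | cons m rest ih =>
    simp only [List.foldl_cons]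
    have hk : ((if decide (1 ≤ m) && decide (m ≤ max_num) then g.insert m v else g) :
        PySem.Dict Int Int).keys = g.keys := by
      split
      · exact PySem.Dict.keys_insert_of_contains g v
          ((PySem.Dict.contains_iff_mem_keys g m).2 (h m List.mem_cons_self))
      · rfl
    rw [ih _ (fun n hn => hk ▸ h n (List.mem_cons_of_mem m hn)), hk]

theorem pv_outerA_keys (max_num L : Int) (l : List (List (String × List Int)))
    (s : Int) (g : PySem.Dict Int Int) (K : List Int)
    (hK : ∀ d ∈ l, ∀ n ∈ pvNums d, n ∈ K) (hg : g.keys = K) :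
    ((PySem.List.enumerate l s).foldl (fun g p =>
        (pvNums p.2).foldl (fun g n' =>
          if decide (n' ≤ max_num) && (g.getD n' 0 == L) then g.insert n' p.1 else g) g) g).keys = K := by
  induction l generalizing s g with
  | nil => simpa [PySem.List.enumerate_nil] using hg
  | cons d rest ih =>
    rw [PySem.List.enumerate_cons, List.foldl_cons]
    exact ih (s + 1) _ (fun d' hd' => hK d' (List.mem_cons_of_mem d hd'))
      (by rw [pv_innerA_keys _ _ _ _ _ (fun n hn => hg ▸ hK d List.mem_cons_self n hn)]; exact hg)

theorem pv_outerB_keys (max_num L : Int) (l : List (List (String × List Int)))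
    (s : Int) (g : PySem.Dict Int Int) (K : List Int)
    (hK : ∀ d ∈ l, ∀ n ∈ pvNums d, n ∈ K) (hg : g.keys = K) :
    ((PySem.List.enumerate l s).foldl (fun g p =>
        (pvNums p.2).foldl (fun g n' =>
          if decide (1 ≤ n') && decide (n' ≤ max_num) then g.insert n' (L - 1 - p.1) else g) g) g).keys = K := by
  induction l generalizing s g with
  | nil => simpa [PySem.List.enumerate_nil] using hg
  | cons d rest ih =>
    rw [PySem.List.enumerate_cons, List.foldl_cons]
    exact ih (s + 1) _ (fun d' hd' => hK d' (List.mem_cons_of_mem d hd'))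
      (by rw [pv_innerB_keys _ _ _ _ (fun n hn => hg ▸ hK d List.mem_cons_self n hn)]; exact hg)

theorem pv_outerA_getD (max_num L : Int) (l : List (List (String × List Int)))
    (s : Int) (g : PySem.Dict Int Int) (n : Int)
    (hn : n ≤ max_num) (hs : 0 ≤ s) (hl : s + l.length ≤ L) :
    ((PySem.List.enumerate l s).foldl (fun g p =>
        (pvNums p.2).foldl (fun g n' =>
          if decide (n' ≤ max_num) && (g.getD n' 0 == L) then g.insert n' p.1 else g) g) g).getD n 0 =
      if g.getD n 0 = L then
        (match pvFirstHit l n with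
         | some j => s + (j : Int)
         | none => L)
      else g.getD n 0 := by
  induction l generalizing s g with
  | nil =>
    rw [PySem.List.enumerate_nil, List.foldl_nil]
    by_cases hg : g.getD n 0 = L <;> simp [pvFirstHit, hg]
  | cons d rest ih =>
    simp only [PySem.List.enumerate_cons, List.foldl_cons]
    have hsL : s ≠ L := by simp only [List.length_cons] at hl; omega
    have hlen : (s + 1) + rest.length ≤ L := by simp only [List.length_cons] at hl; omega
    rw [ih (s + 1) _ (by omega) hlen, pv_innerA_getD _ _ _ _ _ _ hsL]
    by_cases hg : g.getD n 0 = L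
    · by_cases hm : n ∈ pvNums d
      · have hg2 : (if n ∈ pvNums d ∧ n ≤ max_num ∧ g.getD n 0 = L then s else g.getD n 0) = s :=
          if_pos ⟨hm, hn, hg⟩
        rw [hg2, if_neg hsL, if_pos hg]
        simp [pvFirstHit, hm]
      · have hA : ¬(n ∈ pvNums d ∧ n ≤ max_num ∧ g.getD n 0 = L) := fun h => hm h.1
        have hg2 : (if n ∈ pvNums d ∧ n ≤ max_num ∧ g.getD n 0 = L then s else g.getD n 0) =
            g.getD n 0 := if_neg hA
        rw [hg2, if_pos hg]
        simp only [pvFirstHit]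
        rw [if_neg hm]
        cases hf : pvFirstHit rest n with
        | some j => simp only [hf, Option.map_some]; rw [if_pos hg]; push_cast; ring
        | none => simp [hf, hg]
    · have hA : ¬(n ∈ pvNums d ∧ n ≤ max_num ∧ g.getD n 0 = L) := fun h => hg h.2.2
      have hg2 : (if n ∈ pvNums d ∧ n ≤ max_num ∧ g.getD n 0 = L then s else g.getD n 0) =
          g.getD n 0 := if_neg hA
      rw [hg2, if_neg hg, if_neg hg]

theorem pv_outerB_getD (max_num L : Int) (l : List (List (String × List Int)))
    (s : Int) (g : PySem.Dict Int Int) (n : Int)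
    (h1 : 1 ≤ n) (hn : n ≤ max_num) :
    ((PySem.List.enumerate l s).foldl (fun g p =>
        (pvNums p.2).foldl (fun g n' =>
          if decide (1 ≤ n') && decide (n' ≤ max_num) then g.insert n' (L - 1 - p.1) else g) g) g).getD n 0 =
      match pvLastGap l n with
      | some j => L - s - l.length + (j : Int)
      | none => g.getD n 0 := by
  induction l generalizing s g with
  | nil => rw [PySem.List.enumerate_nil, List.foldl_nil]; rfl
  | cons d rest ih =>
    simp only [PySem.List.enumerate_cons, List.foldl_cons]
    rw [ih (s + 1), pv_innerB_getD]
    cases hf : pvLastGap rest n with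
    | some j =>
      simp only [pvLastGap, hf, List.length_cons]
      push_cast; ring
    | none =>
      by_cases hm : n ∈ pvNums d
      · rw [if_pos ⟨hm, h1, hn⟩]
        simp only [pvLastGap, hf, hm, if_true, List.length_cons]
        push_cast; ring
      · rw [if_neg (fun h => hm h.1)]
        simp [pvLastGap, hf, hm]

def pvInit (max_num L : Int) : PySem.Dict Int Int :=
  PySem.Dict.mk ((PySem.List.pyRange 1 (max_num + 1) 1).map (fun n => (n, L)))

theorem pvInit_keys (max_num L : Int) :
    (pvInit max_num L).keys = PySem.List.pyRange 1 (max_num + 1) 1 := by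
  simp [pvInit, PySem.Dict.keys, Function.comp_def]

theorem pvInit_getD (max_num L n : Int) (h : n ∈ PySem.List.pyRange 1 (max_num + 1) 1) :
    (pvInit max_num L).getD n 0 = L := by
  refine PySem.Dict.getD_of_mem_items _ ?_ ?_ 0
  · exact List.mem_map.mpr ⟨n, h, rfl⟩
  · rw [pvInit_keys]; exact PySem.List.nodup_pyRange_one _ _

theorem pvInit_foldl (max_num L : Int) :
    (PySem.List.pyRange 1 (max_num + 1) 1).foldl (fun g n => g.insert n L) PySem.Dict.empty =
      pvInit max_num L := by
  apply PySem.Dict.ext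
  rw [PySem.Dict.items_foldl_insert_fresh _ (fun a => a) (fun _ => L) _
    (fun a _ => by simp) (by simpa using PySem.List.nodup_pyRange_one 1 (max_num + 1))]
  simp [pvInit, PySem.Dict.empty]

theorem pv_A_loop_eq (history : List (List (String × List Int))) (max_num : Int)
    (g : PySem.Dict Int Int) :
    (PySem.List.pyRange ((PySem.List.len history) - 1) (-1) (-1)).foldl (fun g i =>
        (pvNums (PySem.List.pyGetD history i [])).foldl (fun g n =>
          if decide (n ≤ max_num) && (g.getD n 0 == (PySem.List.len history)) then
            g.insert n ((PySem.List.len history) - 1 - i) else g) g) g =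
      (PySem.List.enumerate history.reverse 0).foldl (fun g p =>
        (pvNums p.2).foldl (fun g n =>
          if decide (n ≤ max_num) && (g.getD n 0 == (PySem.List.len history)) then
            g.insert n p.1 else g) g) g := by
  rw [PySem.List.enumerate_eq_map_pyRange history.reverse ([] : List (String × List Int))]
  rw [PySem.List.pyRange_neg_one]
  have h1 : ((PySem.List.len history) - 1 - (-1)).toNat = history.length := by
    simp [PySem.List.len_eq]
  rw [h1]
  have h2 : PySem.List.len history.reverse = ((history.length : Nat) : Int) := by
    simp [PySem.List.len_eq]
  rw [h2, PySem.List.pyRange_zero_nat, List.map_map, List.foldl_map, List.foldl_map]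
  apply PySem.List.foldl_congr_mem
  intro acc k hk
  have hk' : k < history.length := List.mem_range.mp hk
  have harg : PySem.List.pyGetD history ((PySem.List.len history) - 1 - (k : Int)) [] =
      PySem.List.pyGetD history.reverse ((k : Int)) [] := by
    rw [PySem.List.pyGetD_natCast,
      List.getD_eq_getElem _ _ (by simpa using hk'),
      PySem.List.pyGetD_eq_getElem _ _ (by simp [PySem.List.len_eq]; omega)
        (by simp [PySem.List.len_eq]; omega),
      List.getElem_reverse]
    congr 1
    simp only [PySem.List.len_eq]
    omega
  have hval : (PySem.List.len history) - 1 - ((PySem.List.len history) - 1 - (k : Int)) =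
      (k : Int) := by omega
  simp [hval]
  rw [show PySem.List.pyGetD history ((history.length : Int) - 1 - (k : Int)) [] =
      history.reverse[k]?.getD [] from by
    rw [PySem.List.pyGetD_eq_getElem _ _ (by push_cast; omega) (by push_cast; omega),
      List.getElem?_eq_getElem (by simpa using hk'), Option.getD_some, List.getElem_reverse]
    congr 1
    omega]

-- ===== VERDICT (by name: the statement is the Claim_ definition above) =====

theorem gap_profile_spec : Claim_equal_gap_profile := by
  intro history max_num _ hpre
  unfold Spec_gap_profile
  simp only [gap_profile, gap_profile_alt]
  rw [pvInit_foldl, pv_A_loop_eq]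
  rw [show PySem.Dict.mk ((PySem.List.pyRange 1 (max_num + 1) 1).map
      (fun n => (n, PySem.List.len history))) = pvInit max_num (PySem.List.len history) from rfl]
  have hLnat : PySem.List.len history = (history.length : Int) := PySem.List.len_eq _
  have hKrev : ∀ d ∈ history.reverse, ∀ n ∈ pvNums d, n ∈ PySem.List.pyRange 1 (max_num + 1) 1 := by
    intro d hd n hn
    have h := (hpre d (List.mem_reverse.mp hd)).2 n hn
    exact PySem.List.mem_pyRange_one.mpr ⟨h.1, by omega⟩
  have hKfwd : ∀ d ∈ history, ∀ n ∈ pvNums d, n ∈ PySem.List.pyRange 1 (max_num + 1) 1 := by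
    intro d hd n hn
    have h := (hpre d hd).2 n hn
    exact PySem.List.mem_pyRange_one.mpr ⟨h.1, by omega⟩
  have hkeysA := pv_outerA_keys max_num (PySem.List.len history) history.reverse 0 _ _
    hKrev (pvInit_keys max_num (PySem.List.len history))
  have hkeysB := pv_outerB_keys max_num (PySem.List.len history) history 0 _ _
    hKfwd (pvInit_keys max_num (PySem.List.len history))
  have hndA := hkeysA ▸ PySem.List.nodup_pyRange_one 1 (max_num + 1)
  have hndB := hkeysB ▸ PySem.List.nodup_pyRange_one 1 (max_num + 1)
  rw [PySem.Dict.items_eq_map_keys _ hndA 0, PySem.Dict.items_eq_map_keys _ hndB 0,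
    hkeysA, hkeysB]
  apply List.map_congr_left
  intro n hn
  have hb := PySem.List.mem_pyRange_one.mp hn
  refine congrArg (fun v => (n, v)) ?_
  rw [pv_outerA_getD max_num (PySem.List.len history) history.reverse 0
        (pvInit max_num (PySem.List.len history)) n (by omega) (by omega)
        (by rw [hLnat]; simp),
      pv_outerB_getD max_num (PySem.List.len history) history 0
        (pvInit max_num (PySem.List.len history)) n hb.1 (by omega),
      pvInit_getD max_num (PySem.List.len history) n hn, if_pos rfl, pvFirstHit_reverse]
  cases hf : pvLastGap history n with
  | some j => simp only [hf]; rw [hLnat]; push_cast; ring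
  | none => simp [hf]
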